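-- pv_equiv track=rewrite | github.com/bani4/SoftUni-Python | decipherThis.py | decipher_word
-- ===== SOURCE A (Python) =====
-- def decipher_word(word):
--     char_code=''
--     count=0
--     #отделяме числовата част и броим колко знака е
--     for i in word:
--         if i.isdigit():
--             count+=1
--             char_code+=i
--
--     #прилепяме знака като начална буква
--     deciphered_word=chr(int(char_code))
--
--     #вземаме последната за втора
--     deciphered_word+=word[len(word)-1]
--
--     #прилепяме тези които не се променят до предпоследната вкл.
--     for i in range(count+1,len(word)-1):
--         deciphered_word+=word[i]
--
--     #слагаме 1вия след цифрите знак за последен, само ако не съвпада да е последна и втора буква като при 'go'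
--     if count!=len(word)-1:
--         deciphered_word+=word[count]
--     return deciphered_word
-- ===== SOURCE B (Python) =====
-- def decipher_word(word):
--     digits = [c for c in word if c.isdigit()]
--     head = chr(int(''.join(digits)))
--     letters = word[len(digits):]
--     if len(letters) >= 2:
--         return head + letters[-1] + letters[1:-1] + letters[0]
--     return head + letters
-- ===== Notes on version B (the rewrite author's own statement) =====
-- stated objective: simpler
-- what changed: B replaces A's three explicit append-loops with index arithmetic by a split (filter the digits once) followed by a slice-based reconstruction head + letters[-1] + letters[1:-1] + letters[0], guarded by the letter-tail length.
-- outside the precondition, e.g. on decipher_word(''): A raises ValueError, B raises ValueError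
import Mathlib
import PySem

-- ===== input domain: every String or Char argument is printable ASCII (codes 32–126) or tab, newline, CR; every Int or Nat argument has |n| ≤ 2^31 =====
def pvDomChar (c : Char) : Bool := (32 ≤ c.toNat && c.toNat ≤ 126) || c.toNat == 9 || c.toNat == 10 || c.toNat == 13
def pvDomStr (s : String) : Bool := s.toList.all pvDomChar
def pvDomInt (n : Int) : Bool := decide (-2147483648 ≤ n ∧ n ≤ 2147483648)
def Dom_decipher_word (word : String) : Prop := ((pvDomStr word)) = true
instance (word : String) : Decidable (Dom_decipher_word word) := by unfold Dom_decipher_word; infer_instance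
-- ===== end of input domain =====

-- B is SIMPLER: it splits the word once (digit filter) and reconstructs the answer by slicing,
-- instead of A's three explicit append-loops with index arithmetic. Same cost.

-- chr(n): exact for a valid non-surrogate code point (guaranteed by Pre_); used by both ports.
def pyChr (n : Int) : Char := Char.ofNat n.toNat

-- ===== PORT A =====
def decipher_word (word : String) : String :=
  let cs := word.toList
  -- for i in word: if i.isdigit(): count+=1; char_code+=i
  let st := cs.foldl (fun (p : List Char × Int) i =>
      if PySem.Chars.isdigit i then (p.1 ++ [i], p.2 + 1) else p) (([] : List Char), (0 : Int))
  -- deciphered_word = chr(int(char_code))   (int('') ValueError and invalid chr excluded by Pre_)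
  let dw := [pyChr ((PySem.Int.ofChars? st.1).getD 0)]
  -- deciphered_word += word[len(word)-1]    (IndexError on empty word excluded by Pre_)
  let dw := dw ++ [PySem.List.pyGetD cs ((cs.length : Int) - 1) ' ']
  -- for i in range(count+1, len(word)-1): deciphered_word += word[i]
  let dw := (PySem.List.pyRange (st.2 + 1) ((cs.length : Int) - 1) 1).foldl
      (fun acc j => acc ++ [PySem.List.pyGetD cs j ' ']) dw
  -- if count != len(word)-1: deciphered_word += word[count]   (IndexError when count = len excluded by Pre_)
  let dw := if st.2 ≠ (cs.length : Int) - 1 then dw ++ [PySem.List.pyGetD cs st.2 ' '] else dw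
  String.ofList dw

-- ===== PORT B =====
def decipher_word_alt (word : String) : String :=
  let cs := word.toList
  let digits := cs.filter PySem.Chars.isdigit
  let head := pyChr ((PySem.Int.ofChars? digits).getD 0)
  let letters := PySem.List.slice cs (some (digits.length : Int)) none
  if 2 ≤ letters.length then
    String.ofList ([head] ++ [PySem.List.pyGetD letters (-1) ' ']
      ++ PySem.List.slice letters (some 1) (some (-1))
      ++ [PySem.List.pyGetD letters 0 ' '])
  else
    String.ofList ([head] ++ letters)

-- ===== PRECONDITION & SPEC =====
-- valid non-surrogate code point reachable by chr without raising and representable as a Lean Char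
def pvValidCode : Option Int → Bool
  | none => false
  | some code => 0 ≤ code && code < 1114112 && (code < 55296 || 57344 ≤ code)

-- Pre_ excludes: words with no digit (int('') ValueError), all-digit words (IndexError at word[count]),
-- digit strings that are not a valid code point (chr ValueError), and — although A returns there —
-- digit strings naming a UTF-16 surrogate, whose returned lone-surrogate string is not a value of Lean's String type.
def Pre_decipher_word (word : String) : Prop :=
  word.toList.filter PySem.Chars.isdigit ≠ [] ∧
  ¬ word.toList.all PySem.Chars.isdigit = true ∧
  pvValidCode (PySem.Int.ofChars? (word.toList.filter PySem.Chars.isdigit)) = true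

instance (word : String) : Decidable (Pre_decipher_word word) := by
  unfold Pre_decipher_word; infer_instance

def pvWitness_decipher_word : String := "65llohe"

def Spec_decipher_word (word : String) (out : String) : Prop := out = decipher_word_alt word
instance (word : String) (out : String) : Decidable (Spec_decipher_word word out) := by unfold Spec_decipher_word; infer_instance

-- ===== CLAIM (what is proved, stated in full; the proofs are below) =====
def Claim_equal_decipher_word : Prop := ∀ (word : String), Dom_decipher_word word → Pre_decipher_word word → Spec_decipher_word word (decipher_word word)

-- ===== LEMMAS AND PROOFS =====

theorem pv_fold_filter (cs : List Char) (p : List Char × Int) :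
    cs.foldl (fun (p : List Char × Int) i =>
      if PySem.Chars.isdigit i then (p.1 ++ [i], p.2 + 1) else p) p
    = (p.1 ++ cs.filter PySem.Chars.isdigit,
       p.2 + (cs.filter PySem.Chars.isdigit).length) := by
  induction cs generalizing p with
  | nil => simp
  | cons c cs ih =>
    by_cases h : PySem.Chars.isdigit c
    · simp [h, ih]; ring
    · simp [h, ih]

theorem pv_filter_lt (p : Char → Bool) (l : List Char) (h : ¬ l.all p = true) :
    (l.filter p).length < l.length := by
  rcases lt_or_eq_of_le (List.length_filter_le p l) with h1 | h1
  · exact h1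
  · exact absurd (List.all_eq_true.mpr (fun a ha => (List.length_filter_eq_length_iff).mp h1 a ha)) h

theorem decipher_word_spec : Claim_equal_decipher_word := by
  intro word _ hpre
  obtain ⟨hne, hnall, -⟩ := hpre
  unfold Spec_decipher_word
  have hkn : (word.toList.filter PySem.Chars.isdigit).length < word.toList.length :=
    pv_filter_lt _ _ hnall
  simp only [decipher_word, decipher_word_alt, pv_fold_filter, List.nil_append, zero_add,
    PySem.List.slice_from_natCast]
  set cs := word.toList with hcs
  set k := (cs.filter PySem.Chars.isdigit).length with hk
  set n := cs.length with hn
  have hlen : (cs.drop k).length = n - k := by simp; omega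
  by_cases h2 : 2 ≤ (cs.drop k).length
  · rw [if_pos h2]
    rw [if_pos (by omega : (k:Int) ≠ (n:Int) - 1)]
    rw [PySem.List.foldl_append_singleton_eq_map]
    have e1 : PySem.List.pyGetD cs ((n:Int) - 1) ' ' = PySem.List.pyGetD (cs.drop k) (-1) ' ' := by
      rw [PySem.List.pyGetD_eq_getElem cs ' ' (by omega) (by omega),
          PySem.List.pyGetD_neg_one (cs.drop k) ' ' (by intro hnil; rw [hnil] at hlen; simp at hlen; omega),
          List.getLast_eq_getElem, List.getElem_drop]
      exact getElem_congr rfl (by omega) (by omega)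
    have e3 : PySem.List.pyGetD cs (k:Int) ' ' = PySem.List.pyGetD (cs.drop k) 0 ' ' := by
      rw [PySem.List.pyGetD_eq_getElem cs ' ' (by omega) (by omega),
          PySem.List.pyGetD_eq_getElem (cs.drop k) ' ' (by omega) (by omega),
          List.getElem_drop]
      exact getElem_congr rfl (by omega) (by omega)
    have emid : (PySem.List.pyRange ((k:Int) + 1) ((n:Int) - 1)).map (fun j => PySem.List.pyGetD cs j ' ')
        = PySem.List.slice (cs.drop k) (some 1) (some (-1)) := by
      have hr : PySem.List.pyRange ((k:Int) + 1) ((n:Int) - 1) = PySem.List.pyRange ((k:Int) + 1) (PySem.List.len cs.dropLast) := by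
        have : PySem.List.len cs.dropLast = (n:Int) - 1 := by
          simp [PySem.List.len_eq]
          omega
        rw [this]
      rw [hr]
      have emap : List.map (fun j => PySem.List.pyGetD cs j ' ') (PySem.List.pyRange ((k:Int) + 1) (PySem.List.len cs.dropLast))
          = List.map (fun j => PySem.List.pyGetD cs.dropLast j ' ') (PySem.List.pyRange ((k:Int) + 1) (PySem.List.len cs.dropLast)) :=
        List.map_congr_left (fun j hj => by
        have hj' := PySem.List.mem_pyRange_one.mp hj
        have hjlen : PySem.List.len cs.dropLast = (n:Int) - 1 := by
          simp [PySem.List.len_eq]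
          omega
        
        rw [hjlen] at hj'
        show PySem.List.pyGetD cs j ' ' = PySem.List.pyGetD cs.dropLast j ' '
        rw [PySem.List.pyGetD_eq_getElem cs ' ' (by omega) (by omega),
            PySem.List.pyGetD_eq_getElem cs.dropLast ' ' (by omega) (by simp; omega)]
        rw [List.getElem_dropLast])
      rw [emap]
      rw [PySem.List.map_pyGetD_pyRange cs.dropLast ' ' (by omega : (0:Int) ≤ (k:Int) + 1)]
      have c1 : PySem.List.clampIdx (cs.drop k).length 1 = 1 := by
        simp [PySem.List.clampIdx]
        omega
      have h1 : PySem.List.slice (cs.drop k) (some 1) (some (-1))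
          = List.take ((cs.drop k).length - 1 - 1) (List.drop 1 (cs.drop k)) := by
        simp only [PySem.List.slice, PySem.List.clampIdx_neg_one, c1]
      rw [h1, List.drop_drop, List.dropLast_eq_take, List.drop_take]
      have : ((k:Int) + 1).toNat = k + 1 := by omega
      rw [this]
      congr 1
      omega
    rw [e1, e3, emid]
  · rw [if_neg h2]
    have hk1 : k + 1 = n := by omega
    rw [PySem.List.pyRange_one_eq_nil (by omega : (n:Int) - 1 ≤ (k:Int) + 1)]
    rw [if_neg (by omega : ¬((k:Int) ≠ (n:Int) - 1))]
    simp only [List.foldl_nil]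
    rw [List.drop_eq_getElem_cons (by omega : k < cs.length)]
    rw [List.drop_eq_nil_of_le (by omega : cs.length ≤ k + 1)]
    rw [PySem.List.pyGetD_eq_getElem cs ' ' (by omega) (by omega)]
    have hx : cs[(((n:Int)) - 1).toNat]'(by omega) = cs[k]'(by omega) :=
      getElem_congr rfl (by omega) (by omega)
    rw [hx]
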